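-- pv_equiv track=rewrite | github.com/degarmo/caseclosure | backend/tracker/detection/utils/detector_utils.py | detect_pattern_in_sequence
-- ===== SOURCE A (Python) =====
-- from typing import Dict, List, Any, Optional, Tuple
--
-- def detect_pattern_in_sequence(sequence: List[Any], pattern_length: int = 2) -> List[Tuple[int, List]]:
--     """Detect repeating patterns in a sequence"""
--     patterns = []
--
--     if len(sequence) < pattern_length * 2:
--         return patterns
--
--     for i in range(len(sequence) - pattern_length):
--         pattern = sequence[i:i + pattern_length]
--
--         # Look for this pattern in the rest of the sequence
--         for j in range(i + pattern_length, len(sequence) - pattern_length + 1):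
--             if sequence[j:j + pattern_length] == pattern:
--                 patterns.append((i, pattern))
--                 break
--
--     return patterns
-- ===== SOURCE B (Python) =====
-- def detect_pattern_in_sequence(sequence, pattern_length=2):
--     """Detect repeating patterns: index last occurrence of each window, one pass."""
--     n = len(sequence)
--     if n < 2 * pattern_length:
--         return []
--     last = {}
--     for j in range(n - pattern_length + 1):
--         last[tuple(sequence[j:j + pattern_length])] = j
--     return [(i, sequence[i:i + pattern_length])
--             for i in range(n - pattern_length)
--             if last.get(tuple(sequence[i:i + pattern_length]), -1) >= i + pattern_length]
-- ===== Notes on version B (the rewrite author's own statement) =====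
-- stated objective: alternative
-- what changed: B replaces A's per-index rescan of the tail with a single dict pass recording the last occurrence index of every length-L window, then emits i exactly when that last occurrence is >= i+L.
import Mathlib
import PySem

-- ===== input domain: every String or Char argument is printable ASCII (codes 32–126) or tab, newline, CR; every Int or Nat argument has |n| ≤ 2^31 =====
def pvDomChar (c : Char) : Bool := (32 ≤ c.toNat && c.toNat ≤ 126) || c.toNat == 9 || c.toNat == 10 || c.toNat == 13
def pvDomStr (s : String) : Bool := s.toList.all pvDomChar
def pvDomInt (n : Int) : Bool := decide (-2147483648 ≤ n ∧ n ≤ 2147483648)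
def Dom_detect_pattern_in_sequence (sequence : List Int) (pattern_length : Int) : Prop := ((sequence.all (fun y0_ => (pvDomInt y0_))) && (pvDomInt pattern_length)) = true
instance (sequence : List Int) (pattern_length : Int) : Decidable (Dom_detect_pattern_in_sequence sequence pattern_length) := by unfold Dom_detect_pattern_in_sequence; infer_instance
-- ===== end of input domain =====

-- B indexes the last occurrence of every length-L window in one dict pass instead of
-- rescanning the tail for each i (alternative algorithm; the return value is identical).

-- ===== PORT A =====
-- inner 'for j …: if sequence[j:j+L] == pattern: append; break' — the break makes the loop a
-- first-match search; the appended value does not depend on j, so the loop body is this Bool search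
def pvAInner (seq pattern : List Int) (L : Int) : List Int → Bool
  | [] => false
  | j :: rest =>
    if PySem.List.slice seq (some j) (some (j + L)) == pattern then true
    else pvAInner seq pattern L rest

def detect_pattern_in_sequence (sequence : List Int) (pattern_length : Int) : List (Int × List Int) :=
  let patterns : List (Int × List Int) := []
  if (sequence.length : Int) < pattern_length * 2 then patterns
  else
    (PySem.List.pyRange 0 ((sequence.length : Int) - pattern_length) 1).foldl
      (fun acc i =>
        let pattern := PySem.List.slice sequence (some i) (some (i + pattern_length))
        if pvAInner sequence pattern pattern_length
            (PySem.List.pyRange (i + pattern_length) ((sequence.length : Int) - pattern_length + 1) 1)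
        then acc ++ [(i, pattern)] else acc)
      patterns

-- ===== PORT B =====
def detect_pattern_in_sequence_alt (sequence : List Int) (pattern_length : Int) : List (Int × List Int) :=
  let n : Int := sequence.length
  if n < 2 * pattern_length then [] else
  let last : PySem.Dict (List Int) Int :=
    (PySem.List.pyRange 0 (n - pattern_length + 1) 1).foldl
      (fun d j => d.insert (PySem.List.slice sequence (some j) (some (j + pattern_length))) j)
      PySem.Dict.empty
  ((PySem.List.pyRange 0 (n - pattern_length) 1).filter
      (fun i =>
        last.getD (PySem.List.slice sequence (some i) (some (i + pattern_length))) (-1)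
          ≥ i + pattern_length)).map
    (fun i => (i, PySem.List.slice sequence (some i) (some (i + pattern_length))))

-- ===== PRECONDITION & SPEC =====
def Spec_detect_pattern_in_sequence (sequence : List Int) (pattern_length : Int) (out : List (Int × List Int)) : Prop := out = detect_pattern_in_sequence_alt sequence pattern_length
instance (sequence : List Int) (pattern_length : Int) (out : List (Int × List Int)) : Decidable (Spec_detect_pattern_in_sequence sequence pattern_length out) := by unfold Spec_detect_pattern_in_sequence; infer_instance

-- ===== CLAIM (what is proved, stated in full; the proofs are below) =====
def Claim_equal_detect_pattern_in_sequence : Prop := ∀ (sequence : List Int) (pattern_length : Int), Dom_detect_pattern_in_sequence sequence pattern_length → Spec_detect_pattern_in_sequence sequence pattern_length (detect_pattern_in_sequence sequence pattern_length)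

-- ===== LEMMAS AND PROOFS =====

-- A's inner first-match loop is List.any
theorem pvAInner_eq_any (seq pattern : List Int) (L : Int) (js : List Int) :
    pvAInner seq pattern L js
      = js.any (fun j => PySem.List.slice seq (some j) (some (j + L)) == pattern) := by
  induction js with
  | nil => rfl
  | cons j rest ih =>
    simp only [pvAInner, List.any_cons]
    split_ifs with h <;> simp [h, ih]

-- getD after a fold of inserts keyed by `key` = the LAST j in the list with key j = k
theorem getD_foldl_insert_key (key : Int → List Int) (js : List Int)
    (d : PySem.Dict (List Int) Int) (k : List Int) (dflt : Int) :
    ((js.foldl (fun d j => d.insert (key j) j) d).getD k dflt)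
      = ((js.filter (fun j => key j == k)).getLast?).getD (d.getD k dflt) := by
  induction js generalizing d with
  | nil => rfl
  | cons j rest ih =>
    simp only [List.foldl_cons, List.filter_cons]
    rw [ih, PySem.Dict.getD_insert]
    by_cases h : key j = k
    · simp only [h, beq_self_eq_true, if_true]
      cases hF : rest.filter (fun j => key j == k) with
      | nil => simp
      | cons a t => simp [List.getLast?_cons]
    · have hb : (key j == k) = false := by simp [h]
      rw [if_neg (fun he => h he.symm)]
      simp [hb]

-- in a strictly increasing list, getLast bounds every member
theorem le_getLast_of_mem_sorted : ∀ (l : List Int), l.Pairwise (· < ·) →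
    ∀ m, l.getLast? = some m → ∀ x ∈ l, x ≤ m
  | [] => by intro _ m hm; simp at hm
  | [a] => by intro _ m hm x hx; simp at hm hx; omega
  | a :: b :: u => by
    intro hs m hm x hx
    rw [List.getLast?_cons_cons] at hm
    have hrec := le_getLast_of_mem_sorted (b :: u) hs.of_cons m hm
    rcases List.mem_cons.mp hx with rfl | hx'
    · have hb : b ≤ m := hrec b List.mem_cons_self
      have : x < b := (List.pairwise_cons.mp hs).1 b List.mem_cons_self
      omega
    · exact hrec x hx'

theorem detect_pattern_in_sequence_eq (sequence : List Int) (pattern_length : Int) :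
    detect_pattern_in_sequence sequence pattern_length
      = detect_pattern_in_sequence_alt sequence pattern_length := by
  unfold detect_pattern_in_sequence detect_pattern_in_sequence_alt
  set n : Int := (sequence.length : Int) with hn
  set L : Int := pattern_length with hL
  have hn0 : 0 ≤ n := by positivity
  -- B's condition, characterised as "some later occurrence of the window"
  have hlast : ∀ i : Int, 0 ≤ i → i < n - L →
      ((i + L ≤ ((PySem.List.pyRange 0 (n - L + 1) 1).foldl
          (fun d j => d.insert (PySem.List.slice sequence (some j) (some (j + L))) j)
          PySem.Dict.empty).getD (PySem.List.slice sequence (some i) (some (i + L))) (-1))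
        ↔ (∃ j, i + L ≤ j ∧ j < n - L + 1 ∧
            PySem.List.slice sequence (some j) (some (j + L))
              = PySem.List.slice sequence (some i) (some (i + L)))) := by
    intro i hi0 hiu
    rw [getD_foldl_insert_key (fun j => PySem.List.slice sequence (some j) (some (j + L)))]
    set F : List Int := (PySem.List.pyRange 0 (n - L + 1) 1).filter
      (fun j => PySem.List.slice sequence (some j) (some (j + L))
          == PySem.List.slice sequence (some i) (some (i + L))) with hF
    have hiF : i ∈ F := by
      rw [hF]
      refine List.mem_filter.mpr ⟨?_, by simp⟩
      rw [PySem.List.mem_pyRange_one]; omega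
    have hFne : F ≠ [] := List.ne_nil_of_mem hiF
    obtain ⟨m, hm⟩ := Option.ne_none_iff_exists'.mp (fun h => hFne (List.getLast?_eq_none_iff.mp h))
    rw [hm, Option.getD_some]
    have hsF : F.Pairwise (· < ·) :=
      List.Pairwise.filter _ (PySem.List.pairwise_lt_pyRange_one 0 (n - L + 1))
    have hmF : m ∈ F := List.mem_of_getLast? hm
    have hmmem := List.mem_filter.mp hmF
    have hmr := (PySem.List.mem_pyRange_one).mp hmmem.1
    have hmwin : PySem.List.slice sequence (some m) (some (m + L))
        = PySem.List.slice sequence (some i) (some (i + L)) := by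
      have := hmmem.2; simpa using this
    constructor
    · intro hge; exact ⟨m, hge, hmr.2, hmwin⟩
    · rintro ⟨j, hj1, hj2, hjw⟩
      by_cases hj0 : 0 ≤ j
      · have hjF : j ∈ F := by
          rw [hF]
          refine List.mem_filter.mpr ⟨?_, by simp [hjw]⟩
          rw [PySem.List.mem_pyRange_one]; omega
        have := le_getLast_of_mem_sorted F hsF m hm j hjF
        omega
      · -- j < 0 forces i + L < 0 ≤ m
        omega
  by_cases hg : n < L * 2
  · rw [if_pos hg, if_pos (by omega : n < 2 * L)]
  · rw [if_neg hg, if_neg (by omega : ¬ n < 2 * L)]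
    rw [PySem.List.foldl_append_if
        (p := fun i => pvAInner sequence
            (PySem.List.slice sequence (some i) (some (i + L))) L
            (PySem.List.pyRange (i + L) (n - L + 1) 1))
        (f := fun i => (i, PySem.List.slice sequence (some i) (some (i + L))))]
    rw [List.nil_append]
    congr 1
    apply List.filter_congr
    intro i hi
    have hir := (PySem.List.mem_pyRange_one).mp hi
    rw [pvAInner_eq_any]
    apply Bool.eq_iff_iff.mpr
    simp only [List.any_eq_true, PySem.List.mem_pyRange_one, beq_iff_eq,
      decide_eq_true_eq, ge_iff_le]
    constructor
    · rintro ⟨j, ⟨hj1, hj2⟩, hjw⟩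
      exact (hlast i hir.1 hir.2).mpr ⟨j, hj1, hj2, hjw⟩
    · intro hge
      obtain ⟨j, hj1, hj2, hjw⟩ := (hlast i hir.1 hir.2).mp hge
      exact ⟨j, ⟨hj1, hj2⟩, hjw⟩

-- ===== VERDICT (by name: the statement is the Claim_ definition above) =====
theorem detect_pattern_in_sequence_spec : Claim_equal_detect_pattern_in_sequence := by
  intro sequence pattern_length _
  unfold Spec_detect_pattern_in_sequence
  exact detect_pattern_in_sequence_eq sequence pattern_length
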